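-- pv_equiv track=rewrite | github.com/gaurav0535/DSA | Warmup/convert5.py | convertFive
-- ===== SOURCE A (Python) =====
-- def convertFive(n):
--     #Code here
--     i = 0
--     new_num = ""
--     while(n > 0):
--         i = int(n%10)
--         n = int(n/10)
--
--         if (i == 0):
--             i = 5
--         new_num = str(i)+str(new_num)
--     return new_num
-- ===== SOURCE B (Python) =====
-- def convertFive(n):
--     # Convert via the decimal string: substitute '5' for each '0' digit.
--     # n <= 0 (including 0) yields "" exactly as A's while-loop does.
--     if n <= 0:
--         return ""
--     return "".join('5' if c == '0' else c for c in str(n))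
-- ===== Notes on version B (the rewrite author's own statement) =====
-- stated objective: idiomatic
-- what changed: B replaces A's modulo/division digit-extraction loop with reversed string concatenation by converting n to its decimal string once and mapping '0' to '5' over its characters.
import Mathlib
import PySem

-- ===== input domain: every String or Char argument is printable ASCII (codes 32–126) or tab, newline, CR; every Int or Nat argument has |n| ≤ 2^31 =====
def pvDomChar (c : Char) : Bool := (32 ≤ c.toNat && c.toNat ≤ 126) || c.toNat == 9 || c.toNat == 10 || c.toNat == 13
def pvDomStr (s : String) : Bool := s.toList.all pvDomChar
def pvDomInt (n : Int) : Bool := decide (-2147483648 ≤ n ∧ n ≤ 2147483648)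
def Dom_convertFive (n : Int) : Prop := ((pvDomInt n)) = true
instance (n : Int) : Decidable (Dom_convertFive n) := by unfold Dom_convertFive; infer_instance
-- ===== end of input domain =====

-- B converts n to its decimal string once and maps '0'→'5' over the characters,
-- instead of A's modulo/division digit-extraction loop with reversed concatenation (objective: idiomatic).

-- ===== PORT A =====
-- the while-loop of A: digits are strings, new_num is prepended to (kept as List Char per PySem convention)
def convertFiveGo (n : Int) (newNum : List Char) : List Char :=
  if h : n > 0 then
    -- i = int(n % 10); n = int(n / 10)  (int(n/10) is truncating division, exact for |n| < 2^53)
    let i : Int := PySem.Int.mod n 10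
    let n' : Int := PySem.Int.truncdiv n 10
    -- if i == 0: i = 5
    let i : Int := if i = 0 then 5 else i
    convertFiveGo n' (PySem.Int.toChars i ++ newNum)
  else
    newNum
termination_by n.toNat
decreasing_by
  simp only [PySem.Int.truncdiv]
  have h10 : n.tdiv 10 = n / 10 := Int.tdiv_eq_ediv_of_nonneg (by omega)
  omega

def convertFive (n : Int) : String := String.mk (convertFiveGo n [])

-- ===== PORT B =====
def convertFive_alt (n : Int) : String :=
  if n ≤ 0 then ""
  else String.mk ((PySem.Int.toChars n).map (fun c => if c = '0' then '5' else c))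

-- ===== PRECONDITION & SPEC =====
def Spec_convertFive (n : Int) (out : String) : Prop := out = convertFive_alt n
instance (n : Int) (out : String) : Decidable (Spec_convertFive n out) := by unfold Spec_convertFive; infer_instance

-- ===== CLAIM (what is proved, stated in full; the proofs are below) =====
def Claim_equal_convertFive : Prop := ∀ (n : Int), Dom_convertFive n → Spec_convertFive n (convertFive n)

-- ===== LEMMAS AND PROOFS =====

-- Nat.toDigitsCore: the accumulator is just appended
lemma toDigitsCore_acc (b : Nat) : ∀ (f n : Nat) (ds : List Char),
    Nat.toDigitsCore b f n ds = Nat.toDigitsCore b f n [] ++ ds := by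
  intro f
  induction f with
  | zero => intro n ds; simp [Nat.toDigitsCore]
  | succ f ih =>
    intro n ds
    simp only [Nat.toDigitsCore]
    by_cases h : n / b = 0
    · simp [h]
    · rw [if_neg h, if_neg h]
      rw [ih (n / b) (Nat.digitChar (n % b) :: ds), ih (n / b) [Nat.digitChar (n % b)]]
      simp

-- Nat.toDigitsCore: any sufficient fuel gives the same result
lemma toDigitsCore_fuel (b : Nat) (hb : 2 ≤ b) : ∀ (n f₁ f₂ : Nat), n < f₁ → n < f₂ →
    ∀ ds, Nat.toDigitsCore b f₁ n ds = Nat.toDigitsCore b f₂ n ds := by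
  intro n
  induction n using Nat.strong_induction_on with
  | _ n ih =>
    intro f₁ f₂ h₁ h₂ ds
    obtain ⟨g₁, rfl⟩ : ∃ g, f₁ = g + 1 := ⟨f₁ - 1, by omega⟩
    obtain ⟨g₂, rfl⟩ : ∃ g, f₂ = g + 1 := ⟨f₂ - 1, by omega⟩
    simp only [Nat.toDigitsCore]
    by_cases h : n / b = 0
    · simp [h]
    · rw [if_neg h, if_neg h]
      have hnb : n / b < n := by
        have : 0 < n := by
          rcases Nat.eq_zero_or_pos n with h0 | h0
          · exfalso; apply h; simp [h0]
          · exact h0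
        exact Nat.div_lt_self this (by omega)
      exact ih (n / b) hnb g₁ g₂ (by omega) (by omega) _

-- one-step recursion for Nat.toDigits 10
lemma toDigits_step (m : Nat) (hm : 0 < m) :
    Nat.toDigits 10 m =
      (if m < 10 then [Nat.digitChar m]
       else Nat.toDigits 10 (m / 10) ++ [Nat.digitChar (m % 10)]) := by
  unfold Nat.toDigits
  conv_lhs => rw [Nat.toDigitsCore]
  by_cases h : m < 10
  · have h0 : m / 10 = 0 := Nat.div_eq_of_lt h
    simp [h, h0, Nat.mod_eq_of_lt h]
  · have h0 : m / 10 ≠ 0 := by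
      intro hc; exact h (Nat.lt_of_div_eq_zero (by omega) hc)
    rw [if_neg h0, if_neg h]
    rw [toDigitsCore_acc 10 m (m / 10) [Nat.digitChar (m % 10)]]
    congr 1
    exact toDigitsCore_fuel 10 (by omega) (m / 10)
      m (m / 10 + 1) (Nat.div_lt_self hm (by omega)) (by omega) []

-- the per-digit replacement, stated at the character level
lemma digit_subst (d : Nat) (hd : d < 10) :
    PySem.Int.toChars (if (d : Int) = 0 then 5 else (d : Int)) =
      [if Nat.digitChar d = '0' then '5' else Nat.digitChar d] := by
  interval_cases d <;> decide

-- truncdiv and mod on a positive n, lowered to Nat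
lemma truncdiv_ten (n : Int) (hn : 0 < n) :
    PySem.Int.truncdiv n 10 = ((n.toNat / 10 : Nat) : Int) := by
  simp only [PySem.Int.truncdiv]
  have h10 : n.tdiv 10 = n / 10 := Int.tdiv_eq_ediv_of_nonneg (by omega)
  omega

lemma mod_ten (n : Int) (hn : 0 < n) :
    PySem.Int.mod n 10 = ((n.toNat % 10 : Nat) : Int) := by
  rw [PySem.Int.mod_eq_emod_of_pos (show (0:Int) < 10 by omega)]
  omega

-- A's loop produces the '0'→'5'-substituted decimal digits, back to front
lemma convertFiveGo_spec : ∀ (m : Nat), 0 < m → ∀ (acc : List Char),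
    convertFiveGo (m : Int) acc =
      (Nat.toDigits 10 m).map (fun c => if c = '0' then '5' else c) ++ acc := by
  intro m
  induction m using Nat.strong_induction_on with
  | _ m ih =>
    intro hm acc
    rw [convertFiveGo.eq_def]
    have hpos : (m : Int) > 0 := by exact_mod_cast hm
    simp only [dif_pos hpos]
    rw [mod_ten _ hpos, truncdiv_ten _ hpos]
    simp only [Int.toNat_natCast]
    rw [digit_subst (m % 10) (Nat.mod_lt _ (by omega))]
    rw [toDigits_step m hm]
    by_cases h : m < 10
    · have h0 : m / 10 = 0 := Nat.div_eq_of_lt h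
      rw [h0]
      rw [convertFiveGo.eq_def]
      simp [h, Nat.mod_eq_of_lt h]
    · have hlt : m / 10 < m := Nat.div_lt_self hm (by omega)
      have hpos' : 0 < m / 10 := Nat.div_pos (by omega) (by omega)
      rw [ih (m / 10) hlt hpos']
      simp [h]

-- the loop does nothing on n ≤ 0
lemma convertFiveGo_nonpos (n : Int) (hn : n ≤ 0) (acc : List Char) :
    convertFiveGo n acc = acc := by
  rw [convertFiveGo.eq_def]
  simp [show ¬ n > 0 by omega]

-- ===== VERDICT (by name: the statement is the Claim_ definition above) =====
theorem convertFive_spec : Claim_equal_convertFive := by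
  intro n _
  unfold Spec_convertFive convertFive convertFive_alt
  by_cases h : n ≤ 0
  · rw [convertFiveGo_nonpos n h]
    rw [if_pos h]
    rfl
  · have hpos : 0 < n := by omega
    have hcast : n = ((n.toNat : Nat) : Int) := by omega
    rw [if_neg h]
    rw [hcast, convertFiveGo_spec n.toNat (by omega) []]
    simp only [PySem.Int.toChars, List.append_nil]
    rw [if_neg (by omega : ¬ ((n.toNat : Nat) : Int) < 0)]
    simp only [Int.toNat_natCast]
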